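-- pv_equiv track=rewrite | github.com/Nidryen-zh/PrivacyAnnotation | dataset/detect_private_phrase_GPT.py | _merge_entities_with_rules
-- ===== SOURCE A (Python) =====
-- def _merge_entities_with_rules(entities):
--     def _contained(phrase1, phrase2):
--         if phrase1 in phrase2:
--             return True
--         else:
--             return False
--
--     contain_matrix = [[0 for _ in range(len(entities))] for _ in range(len(entities))]
--     for i, phrase1 in enumerate(entities):
--         for j, phrase2 in enumerate(entities):
--             if _contained(phrase1, phrase2):
--                 contain_matrix[i][j] = 1
--
--     entities_new = []
--     for i in range(len(entities)):
--         if sum(contain_matrix[i]) <= 1: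
--             entities_new.append(entities[i])
--     return entities_new
-- ===== SOURCE B (Python) =====
-- def _merge_entities_with_rules(entities):
--     return [p for i, p in enumerate(entities)
--             if not any(i != j and p in q for j, q in enumerate(entities))]
-- ===== Notes on version B (the rewrite author's own statement) =====
-- stated objective: simpler
-- what changed: Replaced the O(n^2)-space boolean containment matrix plus row-sum-threshold pass with a single comprehension that keeps a phrase exactly when no other-index entity contains it, using a short-circuiting any() and no table.
import Mathlib
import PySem

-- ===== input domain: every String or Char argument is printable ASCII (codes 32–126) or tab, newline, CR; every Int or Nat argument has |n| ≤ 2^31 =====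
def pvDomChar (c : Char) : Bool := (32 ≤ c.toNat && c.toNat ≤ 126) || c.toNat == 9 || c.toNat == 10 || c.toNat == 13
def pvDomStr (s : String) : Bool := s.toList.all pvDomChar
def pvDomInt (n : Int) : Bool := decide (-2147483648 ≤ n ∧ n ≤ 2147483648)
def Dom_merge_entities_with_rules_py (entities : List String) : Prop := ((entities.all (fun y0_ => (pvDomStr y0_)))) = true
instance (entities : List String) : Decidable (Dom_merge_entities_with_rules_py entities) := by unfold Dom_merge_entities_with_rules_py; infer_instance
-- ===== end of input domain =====

-- B replaces A's full containment matrix + row-sum threshold by a single short-circuiting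
-- scan: keep a phrase iff no OTHER entity contains it (objective: simpler).

-- ===== PORT A =====
-- the nested helper `_contained`
def pyContained (phrase1 phrase2 : String) : Bool :=
  if PySem.Str.isIn phrase1 phrase2 then true else false

-- `contain_matrix = [[0 for _ in range(len(entities))] for _ in range(len(entities))]`
def pvInitMatrix (entities : List String) : List (List Int) :=
  (PySem.List.pyRange 0 entities.length 1).map (fun _ =>
    (PySem.List.pyRange 0 entities.length 1).map (fun _ => 0))

-- the two nested `for i, phrase1 / for j, phrase2 in enumerate(entities)` loops writing 1s
def pvFillMatrix (entities : List String) : List (List Int) :=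
  (PySem.List.enumerate entities 0).foldl (fun M ip =>
    (PySem.List.enumerate entities 0).foldl (fun M jp =>
      if pyContained ip.2 jp.2 then
        PySem.List.pySetD M ip.1 (PySem.List.pySetD (PySem.List.pyGetD M ip.1 []) jp.1 1)
      else M) M) (pvInitMatrix entities)

-- `for i in range(len(entities)): if sum(contain_matrix[i]) <= 1: entities_new.append(entities[i])`
def merge_entities_with_rules_py (entities : List String) : List String :=
  (PySem.List.pyRange 0 entities.length 1).foldl (fun acc i =>
    if (PySem.List.pyGetD (pvFillMatrix entities) i []).sum ≤ 1 then
      acc ++ [PySem.List.pyGetD entities i ""]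
    else acc) []

-- ===== PORT B =====
def merge_entities_with_rules_py_alt (entities : List String) : List String :=
  ((PySem.List.enumerate entities 0).filter (fun ip =>
      !((PySem.List.enumerate entities 0).any (fun jq =>
          ip.1 != jq.1 && PySem.Str.isIn ip.2 jq.2)))).map (·.2)

-- ===== PRECONDITION & SPEC =====
def Spec_merge_entities_with_rules_py (entities : List String) (out : List String) : Prop := out = merge_entities_with_rules_py_alt entities
instance (entities : List String) (out : List String) : Decidable (Spec_merge_entities_with_rules_py entities out) := by unfold Spec_merge_entities_with_rules_py; infer_instance

-- ===== CLAIM (what is proved, stated in full; the proofs are below) =====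
def Claim_equal_merge_entities_with_rules_py : Prop := ∀ (entities : List String), Dom_merge_entities_with_rules_py entities → Spec_merge_entities_with_rules_py entities (merge_entities_with_rules_py entities)

-- ===== LEMMAS AND PROOFS =====

theorem inner_fold_set (p1 : String) :
    ∀ (xs : List String) (s : Int) (M : List (List Int)) (i : Nat), i < M.length →
      (PySem.List.enumerate xs s).foldl (fun M jp =>
          if pyContained p1 jp.2 then
            PySem.List.pySetD M (i : Int) (PySem.List.pySetD (PySem.List.pyGetD M (i : Int) []) jp.1 1)
          else M) M
        = M.set i ((PySem.List.enumerate xs s).foldl (fun r jp =>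
            if pyContained p1 jp.2 then PySem.List.pySetD r jp.1 1 else r) (M.getD i [])) := by
  intro xs
  induction xs with
  | nil =>
      intro s M i hi
      simp only [PySem.List.enumerate_nil, List.foldl_nil, List.getD_eq_getElem?_getD]
      rw [List.getElem?_eq_getElem hi]
      simp [List.set_getElem_self]
  | cons x xs ih =>
      intro s M i hi
      rw [PySem.List.enumerate_cons]
      simp only [List.foldl_cons]
      by_cases h : pyContained p1 x = true
      · simp only [h, if_pos]
        rw [PySem.List.pySetD_natCast, PySem.List.pyGetD_natCast]
        rw [ih (s+1) _ i (by simp [hi])]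
        rw [List.set_set]
        simp only [List.getD_eq_getElem?_getD]
        rw [List.getElem?_set_self (by simpa using hi)]
        simp
      · simp only [h, if_neg, Bool.false_eq_true, not_false_iff]
        exact ih (s+1) M i hi

theorem row_fold_char (p1 : String) :
    ∀ (xs : List String) (s : Nat) (r : List Int), r.length = s + xs.length →
      r.drop s = List.replicate xs.length 0 →
      (PySem.List.enumerate xs (s : Int)).foldl (fun r jp =>
          if pyContained p1 jp.2 then PySem.List.pySetD r jp.1 1 else r) r
        = r.take s ++ xs.map (fun q => if pyContained p1 q then (1 : Int) else 0) := by
  intro xs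
  induction xs with
  | nil =>
      intro s r hlen hdrop
      simp only [PySem.List.enumerate_nil, List.foldl_nil, List.map_nil, List.append_nil]
      rw [List.take_of_length_le (le_of_eq (by simpa using hlen))]
  | cons x xs ih =>
      intro s r hlen hdrop
      have hlen' : r.length = s + xs.length + 1 := by simp at hlen; omega
      have hs : s < r.length := by omega
      have hr : r[s] = 0 := by
        have : (r.drop s)[0]'(by simp [hdrop]) = 0 := by simp [hdrop]
        simpa [List.getElem_drop] using this
      have hdrop' : r.drop (s+1) = List.replicate xs.length 0 := by
        have := congrArg List.tail hdrop
        simpa [List.tail_drop, List.replicate_succ] using this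
      rw [PySem.List.enumerate_cons]
      simp only [List.foldl_cons]
      have hcast : ((s : Int) + 1) = ((s+1 : Nat) : Int) := by push_cast; ring
      by_cases h : pyContained p1 x = true
      · simp only [h, if_pos]
        rw [PySem.List.pySetD_natCast]
        rw [hcast, ih (s+1) (r.set s 1) (by simp; omega)
             (by rw [List.drop_set]; simp [hdrop'])]
        rw [List.take_add_one, List.take_set]
        rw [List.getElem?_set_self (by simpa using hs)]
        rw [List.set_eq_of_length_le (by simp)]
        simp [h]
      · simp only [h, if_neg, Bool.false_eq_true, not_false_iff]
        rw [hcast, ih (s+1) r (by omega) hdrop']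
        rw [List.take_add_one, List.getElem?_eq_getElem hs]
        simp [h, hr]

theorem outer_fold_char (E : List String) :
    ∀ (xs : List String) (s : Nat) (M : List (List Int)), M.length = s + xs.length →
      M.drop s = List.replicate xs.length (List.replicate E.length 0) →
      (PySem.List.enumerate xs (s : Int)).foldl (fun M ip =>
          (PySem.List.enumerate E 0).foldl (fun M jp =>
            if pyContained ip.2 jp.2 then
              PySem.List.pySetD M ip.1 (PySem.List.pySetD (PySem.List.pyGetD M ip.1 []) jp.1 1)
            else M) M) M
        = M.take s ++ xs.map (fun p1 => E.map (fun q => if pyContained p1 q then (1 : Int) else 0)) := by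
  intro xs
  induction xs with
  | nil =>
      intro s M hlen hdrop
      simp only [PySem.List.enumerate_nil, List.foldl_nil, List.map_nil, List.append_nil]
      rw [List.take_of_length_le (le_of_eq (by simpa using hlen))]
  | cons x xs ih =>
      intro s M hlen hdrop
      have hlen' : M.length = s + xs.length + 1 := by simp at hlen; omega
      have hs : s < M.length := by omega
      have hM : M.getD s [] = List.replicate E.length 0 := by
        rw [List.getD_eq_getElem _ _ hs]
        have : (M.drop s)[0]'(by simp [hdrop]) = List.replicate E.length 0 := by simp [hdrop]
        simpa [List.getElem_drop] using this
      have hdrop' : M.drop (s+1) = List.replicate xs.length (List.replicate E.length 0) := by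
        have := congrArg List.tail hdrop
        simpa [List.tail_drop, List.replicate_succ] using this
      rw [PySem.List.enumerate_cons]
      simp only [List.foldl_cons]
      have hcast : ((s : Int) + 1) = ((s+1 : Nat) : Int) := by push_cast; ring
      rw [inner_fold_set x E 0 M s hs]
      rw [hM]
      have hrow := row_fold_char x E 0 (List.replicate E.length 0) (by simp) (by simp)
      simp only [Nat.cast_zero] at hrow
      rw [hrow]
      simp only [List.take_zero, List.nil_append]
      rw [hcast, ih (s+1) _ (by simp; omega)
           (by rw [List.drop_set]; simp [hdrop'])]
      rw [List.take_add_one, List.take_set]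
      rw [List.getElem?_set_self (by simpa using hs)]
      rw [List.set_eq_of_length_le (by simp)]
      simp

theorem initMatrix_eq (E : List String) :
    pvInitMatrix E = List.replicate E.length (List.replicate E.length 0) := by
  unfold pvInitMatrix
  rw [List.map_const']
  congr 1
  · simp [PySem.List.length_pyRange_one]
  · rw [List.map_const']
    congr 1
    simp [PySem.List.length_pyRange_one]

theorem fillMatrix_eq (E : List String) :
    pvFillMatrix E = E.map (fun p1 => E.map (fun q => if pyContained p1 q then (1 : Int) else 0)) := by
  unfold pvFillMatrix
  rw [initMatrix_eq]
  have h := outer_fold_char E E 0 (List.replicate E.length (List.replicate E.length 0))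
      (by simp) (by simp)
  simpa using h

theorem countP_le_one_iff {α : Type} (p : α → Bool) :
    ∀ (l : List α) (i : Nat) (hi : i < l.length), p l[i] = true →
      (l.countP p ≤ 1 ↔ ∀ (j : Nat) (hj : j < l.length), j ≠ i → p l[j] = false) := by
  intro l
  induction l with
  | nil => intro i hi; simp at hi
  | cons x l ih =>
      intro i hi hp
      cases i with
      | zero =>
          simp only [List.getElem_cons_zero] at hp
          rw [List.countP_cons_of_pos hp]
          constructor
          · intro h j hj hj0
            cases j with
            | zero => exact absurd rfl hj0
            | succ j =>
                have hcnt : l.countP p = 0 := by omega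
                have := List.countP_eq_zero.mp hcnt
                simp only [List.getElem_cons_succ]
                have hjl : j < l.length := by simpa using hj
                have hm : l[j] ∈ l := List.getElem_mem hjl
                simpa using this _ hm
          · intro h
            have hcnt : l.countP p = 0 := by
              apply List.countP_eq_zero.mpr
              intro a ha
              obtain ⟨j, hj, rfl⟩ := List.getElem_of_mem ha
              have := h (j+1) (by simpa using Nat.succ_lt_succ hj) (by omega)
              simpa using this
            omega
      | succ i =>
          simp only [List.getElem_cons_succ] at hp
          have hi' : i < l.length := by simpa using hi
          cases hx : p x with
          | true =>
              rw [List.countP_cons_of_pos hx]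
              have hpos : 0 < l.countP p := List.countP_pos_iff.mpr ⟨l[i], List.getElem_mem _, hp⟩
              constructor
              · intro h; omega
              · intro h
                have := h 0 (by simp) (by omega)
                simp [hx] at this
          | false =>
              rw [List.countP_cons_of_neg (by simp [hx])]
              rw [ih i hi' hp]
              constructor
              · intro h j hj hj0
                cases j with
                | zero => simpa using hx
                | succ j =>
                    simp only [List.getElem_cons_succ]
                    exact h j (by simpa using hj) (by omega)
              · intro h j hj hj0
                have := h (j+1) (by simpa using Nat.succ_lt_succ hj) (by omega)
                simpa using this

theorem foldl_append_ite {α β : Type} (P : α → Prop) [DecidablePred P] (f : α → β) :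
    ∀ (l : List α) (acc : List β),
      l.foldl (fun acc x => if P x then acc ++ [f x] else acc) acc
        = acc ++ (l.filter (fun x => decide (P x))).map f := by
  intro l
  induction l with
  | nil => simp
  | cons x l ih =>
      intro acc
      by_cases h : P x <;> simp [List.foldl_cons, h, ih]

theorem pred_eq (E : List String) (k : Nat) (hk : k < E.length) :
    decide (((E.map (fun p1 => E.map (fun q => if pyContained p1 q then (1:Int) else 0))).getD k []).sum ≤ 1)
      = !((PySem.List.pyRange 0 (E.length:Int) 1).any (fun j =>
            ((k:Int) != j) && PySem.Str.isIn (PySem.List.pyGetD E (k:Int) "") (PySem.List.pyGetD E j ""))) := by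
  have hk' : k < (E.map (fun p1 => E.map (fun q => if pyContained p1 q then (1:Int) else 0))).length := by
    simpa using hk
  rw [List.getD_eq_getElem _ _ hk', List.getElem_map]
  rw [PySem.List.sum_map_ite_one_zero]
  rw [PySem.List.pyGetD_natCast, List.getD_eq_getElem _ _ hk]
  have hself : pyContained E[k] E[k] = true := by
    rw [pyContained, if_pos]
    exact (PySem.Chars.isIn_iff_infix _ _).mpr (List.infix_refl _)
  rw [Bool.eq_iff_iff]
  rw [decide_eq_true_eq]
  have hcast : ((E.countP (fun q => pyContained E[k] q) : Int) ≤ 1) ↔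
      E.countP (fun q => pyContained E[k] q) ≤ 1 := by exact_mod_cast Iff.rfl
  rw [hcast, countP_le_one_iff _ E k hk hself]
  rw [Bool.not_eq_eq_eq_not, Bool.not_true, List.any_eq_false]
  constructor
  · intro h j hj
    rw [PySem.List.mem_pyRange_one] at hj
    obtain ⟨h0, hn⟩ := hj
    lift j to Nat using h0 with m
    have hm : m < E.length := by exact_mod_cast hn
    rw [PySem.List.pyGetD_natCast, List.getD_eq_getElem _ _ hm]
    by_cases hmk : m = k
    · subst hmk
      simp
    · have := h m hm hmk
      simp [pyContained] at this
      simp [this]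
  · intro h j hj hjk
    have := h (j : Int) (by rw [PySem.List.mem_pyRange_one]; constructor <;> [positivity; exact_mod_cast hj])
    rw [PySem.List.pyGetD_natCast, List.getD_eq_getElem _ _ hj] at this
    simp only [Bool.not_eq_true, Bool.and_eq_false_iff] at this
    rcases this with h1 | h2
    · exfalso; apply hjk; symm; exact_mod_cast (by simpa using h1 : (k:Int) = j)
    · rw [pyContained, if_neg]
      simpa [PySem.Str.isIn] using h2

-- ===== VERDICT (by name: the statement is the Claim_ definition above) =====
theorem merge_entities_with_rules_py_spec : Claim_equal_merge_entities_with_rules_py := by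
  intro E _
  unfold Spec_merge_entities_with_rules_py merge_entities_with_rules_py merge_entities_with_rules_py_alt
  rw [foldl_append_ite (fun i => (PySem.List.pyGetD (pvFillMatrix E) i []).sum ≤ 1)
       (fun i => PySem.List.pyGetD E i "")]
  rw [PySem.List.enumerate_eq_map_pyRange E ""]
  rw [List.filter_map, List.map_map]
  rw [List.nil_append]
  simp only [PySem.List.len_eq, List.any_map]
  congr 1
  apply List.filter_congr
  intro i hi
  rw [PySem.List.mem_pyRange_one] at hi
  lift i to Nat using hi.1 with k
  have hk : k < E.length := by exact_mod_cast hi.2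
  rw [fillMatrix_eq, PySem.List.pyGetD_natCast]
  exact pred_eq E k hk
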